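-- pv_equiv track=rewrite | github.com/vinnyhoward/til | python/toy-problems/scrolling_text.py | scrolling_text
-- ===== SOURCE A (Python) =====
-- def scrolling_text(text):
--     new_list = []
--     new_list.append(text.upper())
--
--     temp_list = text[:1]
--     second_list = text[1:]
--
--     new_word = second_list + temp_list
--     new_list.append(new_word.upper())
--     for x in text:
--         if new_word != text:
--             temp_list = new_word[:1]
--             second_list = new_word[1:]
--
--             new_word = second_list + temp_list
--             new_list.append(new_word.upper())
--
--     return new_list[:-1]
-- ===== SOURCE B (Python) =====
-- def scrolling_text(text):
--     result = [text.upper()]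
--     for k in range(1, len(text)):
--         rot = text[k:] + text[:k]
--         if rot == text:
--             break
--         result.append(rot.upper())
--     return result
-- ===== Notes on version B (the rewrite author's own statement) =====
-- stated objective: simpler
-- what changed: B computes each rotation k directly from the original string as text[k:]+text[:k] inside a range loop with an early break at the period, instead of A's chained rotate-by-one state machine with an unconditional extra append and a trailing [:-1] slice.
import Mathlib
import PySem

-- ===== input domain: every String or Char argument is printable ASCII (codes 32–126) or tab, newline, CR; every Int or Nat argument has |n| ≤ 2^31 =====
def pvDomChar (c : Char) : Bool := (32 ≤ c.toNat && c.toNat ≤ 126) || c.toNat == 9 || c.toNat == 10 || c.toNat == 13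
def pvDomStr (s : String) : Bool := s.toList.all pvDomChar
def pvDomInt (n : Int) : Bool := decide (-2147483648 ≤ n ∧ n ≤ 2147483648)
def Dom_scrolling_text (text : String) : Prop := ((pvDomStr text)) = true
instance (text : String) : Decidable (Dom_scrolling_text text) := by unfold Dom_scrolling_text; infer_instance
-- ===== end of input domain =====

-- B builds each rotation directly from the original string by offset k and breaks at the period,
-- replacing A's chained rotate-and-append loop with its trailing [:-1]; objective: simpler.
-- Strings are handled on their code-point lists (PySem.Chars / String.ofList), exact per PySem.

-- ===== PORT A =====
def scrolling_text (text : String) : List String :=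
  let t := text.toList
  let new_list : List String := [] ++ [String.ofList (PySem.Chars.upper t)]
  let temp_list := PySem.List.slice t none (some 1)
  let second_list := PySem.List.slice t (some 1) none
  let new_word := second_list ++ temp_list
  let new_list := new_list ++ [String.ofList (PySem.Chars.upper new_word)]
  let st := t.foldl (fun (s : List Char × List String) _ =>
    if s.1 ≠ t then
      let temp_list := PySem.List.slice s.1 none (some 1)
      let second_list := PySem.List.slice s.1 (some 1) none
      let new_word := second_list ++ temp_list
      (new_word, s.2 ++ [String.ofList (PySem.Chars.upper new_word)])
    else s) (new_word, new_list)
  PySem.List.slice st.2 none (some (-1))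

-- ===== PORT B =====
def scrolling_text_altGo (t : List Char) (ks : List Int) (result : List String) : List String :=
  match ks with
  | [] => result
  | k :: rest =>
    let rot := PySem.List.slice t (some k) none ++ PySem.List.slice t none (some k)
    if rot = t then result
    else scrolling_text_altGo t rest (result ++ [String.ofList (PySem.Chars.upper rot)])

def scrolling_text_alt (text : String) : List String :=
  let t := text.toList
  scrolling_text_altGo t (PySem.List.pyRange 1 (t.length : Int) 1)
    [String.ofList (PySem.Chars.upper t)]

-- ===== PRECONDITION & SPEC =====
def Spec_scrolling_text (text : String) (out : List String) : Prop := out = scrolling_text_alt text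
instance (text : String) (out : List String) : Decidable (Spec_scrolling_text text out) := by unfold Spec_scrolling_text; infer_instance

-- ===== CLAIM (what is proved, stated in full; the proofs are below) =====
def Claim_equal_scrolling_text : Prop := ∀ (text : String), Dom_scrolling_text text → Spec_scrolling_text text (scrolling_text text)

-- ===== LEMMAS AND PROOFS =====

-- rotation of t by k positions
def pvRot (t : List Char) (m : Nat) : List Char := t.drop m ++ t.take m

-- uppercased rotation as a String
def pvU (cs : List Char) : String := String.ofList (PySem.Chars.upper cs)

theorem pvRot_length (t : List Char) : pvRot t t.length = t := by simp [pvRot]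

-- rotating pvRot t m left by one gives pvRot t (m+1), for m < |t|
theorem pvRot_step (t : List Char) (m : Nat) (hm : m < t.length) :
    (pvRot t m).drop 1 ++ (pvRot t m).take 1 = pvRot t (m + 1) := by
  have hd : t.drop m = t[m] :: t.drop (m + 1) := List.drop_eq_getElem_cons hm
  have ht : t.take (m + 1) = t.take m ++ [t[m]] := by
    rw [List.take_add_one]; simp [hm]
  unfold pvRot
  rw [hd, ht]
  generalize List.drop (m + 1) t = d
  generalize List.take m t = tk
  simp

-- the frozen fold: once the state equals t the loop body is the identity
theorem pvFold_frozen (t : List Char) (l : List Char) (acc : List String) :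
    l.foldl (fun (s : List Char × List String) _ =>
      if s.1 ≠ t then
        (PySem.List.slice s.1 (some 1) none ++ PySem.List.slice s.1 none (some 1),
         s.2 ++ [String.ofList (PySem.Chars.upper (PySem.List.slice s.1 (some 1) none ++ PySem.List.slice s.1 none (some 1)))])
      else s) (t, acc) = (t, acc) := by
  induction l with
  | nil => rfl
  | cons x xs ih => simpa using ih

-- main invariant: A's remaining fold, minus its trailing element, is B's loop from offset m
theorem pvMain (t : List Char) (l : List Char) (m : Nat) (acc0 : List String)
    (h1 : 1 ≤ m) (h2 : m ≤ t.length) (h3 : t.length ≤ m + l.length) :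
    (l.foldl (fun (s : List Char × List String) _ =>
      if s.1 ≠ t then
        (PySem.List.slice s.1 (some 1) none ++ PySem.List.slice s.1 none (some 1),
         s.2 ++ [String.ofList (PySem.Chars.upper (PySem.List.slice s.1 (some 1) none ++ PySem.List.slice s.1 none (some 1)))])
      else s) (pvRot t m, acc0 ++ [pvU (pvRot t m)])).2.dropLast
    = scrolling_text_altGo t (PySem.List.pyRange (m : Int) (t.length : Int) 1) acc0 := by
  induction l generalizing m acc0 with
  | nil =>
    simp at h3
    have hm : m = t.length := le_antisymm h2 h3
    subst hm
    rw [PySem.List.pyRange_one_eq_nil (by omega)]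
    simp [scrolling_text_altGo]
  | cons x xs ih =>
    by_cases hrot : pvRot t m = t
    · -- loop frozen; B also stops at offset m (or its range is empty)
      rw [List.foldl_cons]
      simp only [hrot, ne_eq, not_true_eq_false, if_false]
      rw [pvFold_frozen]
      simp only [List.dropLast_concat]
      rcases lt_or_ge (m : Int) (t.length : Int) with hlt | hge
      · rw [PySem.List.pyRange_one_cons hlt]
        simp only [scrolling_text_altGo, PySem.List.slice_from_natCast,
          PySem.List.slice_to_natCast]
        rw [if_pos]
        exact hrot
      · rw [PySem.List.pyRange_one_eq_nil hge]
        rfl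
    · -- one more rotation on both sides
      have hmlt : m < t.length := by
        rcases lt_or_eq_of_le h2 with h | h
        · exact h
        · exact absurd (h ▸ pvRot_length t) hrot
      rw [List.foldl_cons]
      have hslice : PySem.List.slice (pvRot t m) (some 1) none ++
          PySem.List.slice (pvRot t m) none (some 1) = pvRot t (m + 1) := by
        rw [show (1 : Int) = ((1 : Nat) : Int) from rfl, PySem.List.slice_from_natCast,
          PySem.List.slice_to_natCast]
        exact pvRot_step t m hmlt
      rw [hslice]
      rw [show String.ofList (PySem.Chars.upper (pvRot t (m + 1))) = pvU (pvRot t (m + 1)) from rfl]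
      rw [if_pos hrot]
      rw [PySem.List.pyRange_one_cons (show (m : Int) < (t.length : Int) by exact_mod_cast hmlt)]
      simp only [scrolling_text_altGo, PySem.List.slice_from_natCast,
        PySem.List.slice_to_natCast]
      rw [show List.drop m t ++ List.take m t = pvRot t m from rfl, if_neg hrot]
      rw [show String.ofList (PySem.Chars.upper (pvRot t m)) = pvU (pvRot t m) from rfl]
      have := ih (m + 1) (acc0 ++ [pvU (pvRot t m)]) (by omega) (by omega)
        (by simp at h3 ⊢; omega)
      push_cast at this
      exact this

theorem scrolling_text_spec : Claim_equal_scrolling_text := by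
  intro text _
  unfold Spec_scrolling_text
  simp only [scrolling_text, scrolling_text_alt]
  rcases eq_or_ne text.toList [] with ht | ht
  · simp [ht, scrolling_text_altGo, PySem.List.pyRange_one_eq_nil, PySem.List.slice]
  · have hn : 0 < text.toList.length := List.length_pos_iff.mpr ht
    have hnw : PySem.List.slice text.toList (some 1) none ++
        PySem.List.slice text.toList none (some 1) = pvRot text.toList 1 := by
      rw [show (1 : Int) = ((1 : Nat) : Int) from rfl, PySem.List.slice_from_natCast,
        PySem.List.slice_to_natCast]
      rfl
    rw [hnw, PySem.List.slice_to_neg_one]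
    simp only [List.nil_append]
    rw [show String.ofList (PySem.Chars.upper (pvRot text.toList 1)) = pvU (pvRot text.toList 1) from rfl]
    have := pvMain text.toList text.toList 1 [String.ofList (PySem.Chars.upper text.toList)]
      le_rfl hn (by omega)
    simp only [Nat.cast_one] at this
    exact this
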